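-- pv_equiv track=rewrite | github.com/hyonaldo/reinforcement-learning | agents.py | decide_virtual_image_size
-- ===== SOURCE A (Python) =====
-- def decide_virtual_image_size(input_size):
--     width_height = 2  # only take even
--     max_wh = 1000
--
--     while width_height < max_wh:
--         width_height = width_height + 2  # only take even
--         expand_size = pow(width_height, 2)
--         diff = abs(input_size - expand_size)
--         next_diff = abs(input_size - pow(width_height + 1, 2))
--         if expand_size >= input_size and diff < next_diff:
--             break
--
--     return width_height, expand_size
-- ===== SOURCE B (Python) =====
-- def decide_virtual_image_size(input_size):
--     # Binary search over even candidates in [4, 1000] for the smallest even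
--     # side whose square covers input_size (1000 if none does).
--     lo, hi = 4, 1000
--     while lo < hi:
--         mid = (lo + hi) // 2
--         mid -= mid % 2
--         if mid * mid >= input_size:
--             hi = mid
--         else:
--             lo = mid + 2
--     return lo, lo * lo
-- ===== Notes on version B (the rewrite author's own statement) =====
-- stated objective: faster
-- what changed: A scans the even candidate sides upward one step at a time (with a redundant nearest-square test on each); B binary-searches the even candidate range for the smallest side whose square covers input_size.
import Mathlib
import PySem

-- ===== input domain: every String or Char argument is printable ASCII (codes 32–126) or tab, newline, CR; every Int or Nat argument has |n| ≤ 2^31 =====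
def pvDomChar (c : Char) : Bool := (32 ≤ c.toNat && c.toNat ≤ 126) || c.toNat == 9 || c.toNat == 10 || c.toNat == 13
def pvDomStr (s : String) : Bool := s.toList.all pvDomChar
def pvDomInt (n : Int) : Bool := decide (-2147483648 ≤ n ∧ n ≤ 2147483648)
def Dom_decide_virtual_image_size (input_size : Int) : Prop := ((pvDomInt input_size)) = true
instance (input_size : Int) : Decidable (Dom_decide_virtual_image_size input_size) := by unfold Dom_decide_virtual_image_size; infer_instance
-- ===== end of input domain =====

-- B replaces A's linear scan over the even candidate sides by a binary search on that range (objective: faster).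

-- ===== PORT A =====
-- A's while loop: width_height steps up by two while below the cap; break when the
-- square covers input_size and is nearer than the next (odd) square.
def pvLoopA (input_size wh : Int) : Int × Int :=
  if wh < 1000 then
    let wh' := wh + 2
    let expand_size := wh' * wh'
    let diff := |input_size - expand_size|
    let next_diff := |input_size - (wh' + 1) * (wh' + 1)|
    if expand_size ≥ input_size ∧ diff < next_diff then (wh', expand_size)
    else pvLoopA input_size wh'
  else (wh, wh * wh)
  termination_by (1000 - wh).toNat
  decreasing_by omega

def decide_virtual_image_size (input_size : Int) : Int × Int :=
  pvLoopA input_size 2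

-- ===== PORT B =====
-- B's while loop: binary search, lo/hi even, for the smallest even side in the
-- candidate range whose square covers input_size (the cap if none does).
def pvLoopB (input_size lo hi : Int) : Int :=
  if lo < hi then
    let m0 := PySem.Int.floordiv (lo + hi) 2
    let mid := m0 - PySem.Int.mod m0 2
    if mid * mid ≥ input_size then pvLoopB input_size lo mid
    else pvLoopB input_size (mid + 2) hi
  else lo
  termination_by (hi - lo).toNat
  decreasing_by
  · have h2 := PySem.Int.mod_nonneg (PySem.Int.floordiv (lo + hi) 2) (b := 2) (by omega)
    have h3 := PySem.Int.mod_lt (PySem.Int.floordiv (lo + hi) 2) (b := 2) (by omega)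
    have h4 : PySem.Int.floordiv (lo + hi) 2 < hi :=
      (PySem.Int.floordiv_lt_iff_lt_mul (by omega)).mpr (by omega)
    omega
  · have h1 := PySem.Int.floordiv_two_mid_bounds (lo := lo) (hi := hi) (by omega)
    have h2 := PySem.Int.mod_nonneg (PySem.Int.floordiv (lo + hi) 2) (b := 2) (by omega)
    have h3 := PySem.Int.mod_lt (PySem.Int.floordiv (lo + hi) 2) (b := 2) (by omega)
    omega

def decide_virtual_image_size_alt (input_size : Int) : Int × Int :=
  let lo := pvLoopB input_size 4 1000
  (lo, lo * lo)

-- ===== PRECONDITION & SPEC =====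
def Spec_decide_virtual_image_size (input_size : Int) (out : Int × Int) : Prop := out = decide_virtual_image_size_alt input_size
instance (input_size : Int) (out : Int × Int) : Decidable (Spec_decide_virtual_image_size input_size out) := by unfold Spec_decide_virtual_image_size; infer_instance

-- ===== CLAIM (what is proved, stated in full; the proofs are below) =====
def Claim_equal_decide_virtual_image_size : Prop := ∀ (input_size : Int), Dom_decide_virtual_image_size input_size → Spec_decide_virtual_image_size input_size (decide_virtual_image_size input_size)

-- ===== LEMMAS AND PROOFS =====

-- The common characterisation: w is the smallest even candidate in range whose
-- square covers the input, or the cap if none does.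
def pvAns (input_size w : Int) : Prop :=
  4 ≤ w ∧ w ≤ 1000 ∧ w % 2 = 0 ∧ (w * w ≥ input_size ∨ w = 1000) ∧
    (∀ v : Int, 4 ≤ v → v < w → v % 2 = 0 → v * v < input_size)

theorem pvAns_unique {input_size w1 w2 : Int}
    (h1 : pvAns input_size w1) (h2 : pvAns input_size w2) : w1 = w2 := by
  obtain ⟨a1, b1, c1, d1, e1⟩ := h1
  obtain ⟨a2, b2, c2, d2, e2⟩ := h2
  by_contra hne
  rcases lt_or_gt_of_ne hne with h | h
  · have := e2 w1 a1 h c1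
    rcases d1 with h' | h' <;> omega
  · have := e1 w2 a2 h c2
    rcases d2 with h' | h' <;> omega

theorem pvLoopA_spec (input_size : Int) : ∀ wh : Int, wh % 2 = 0 → 2 ≤ wh → wh ≤ 1000 →
    (∀ v : Int, 4 ≤ v → v ≤ wh → v % 2 = 0 → v * v < input_size) →
    pvAns input_size (pvLoopA input_size wh).1 ∧
      (pvLoopA input_size wh).2 = (pvLoopA input_size wh).1 * (pvLoopA input_size wh).1 := by
  intro wh
  induction h : (1000 - wh).toNat using Nat.strong_induction_on generalizing wh with
  | _ n ih =>
    intro heven h2 h1000 hmin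
    rw [pvLoopA]
    by_cases hlt : wh < 1000
    · rw [if_pos hlt]
      set wh' := wh + 2 with hwh'
      by_cases hcov : wh' * wh' ≥ input_size ∧
          |input_size - wh' * wh'| < |input_size - (wh' + 1) * (wh' + 1)|
      · rw [if_pos hcov]
        refine ⟨⟨by omega, by omega, by omega, Or.inl hcov.1, ?_⟩, rfl⟩
        intro v h4 hvlt hv2
        exact hmin v h4 (by omega) hv2
      · rw [if_neg hcov]
        refine ih (1000 - wh').toNat (by omega) wh' rfl (by omega) (by omega) (by omega) ?_
        intro v h4 hvle hv2
        rcases lt_or_ge v wh' with h' | h'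
        · exact hmin v h4 (by omega) hv2
        · -- v = wh', so the break condition failed: its square does not cover
          have hv : v = wh' := by omega
          by_contra hge
          push Not at hge
          apply hcov
          have hge' : input_size ≤ wh' * wh' := hv ▸ hge
          refine ⟨hge', ?_⟩
          have ha1 : |input_size - wh' * wh'| = wh' * wh' - input_size := by
            rw [abs_of_nonpos (by omega)]; ring
          have ha2 : |input_size - (wh' + 1) * (wh' + 1)| = (wh' + 1) * (wh' + 1) - input_size := by
            rw [abs_of_nonpos (by nlinarith)]; ring
          rw [ha1, ha2]
          nlinarith
    · rw [if_neg hlt]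
      have hwh : wh = 1000 := by omega
      subst hwh
      refine ⟨⟨by omega, by omega, by omega, Or.inr rfl, ?_⟩, rfl⟩
      intro v h4 hvlt hv2
      exact hmin v h4 (by omega) hv2

theorem pvLoopB_spec (input_size : Int) : ∀ lo hi : Int, lo % 2 = 0 → hi % 2 = 0 →
    4 ≤ lo → lo ≤ hi → hi ≤ 1000 →
    (∀ v : Int, 4 ≤ v → v < lo → v % 2 = 0 → v * v < input_size) →
    (hi * hi ≥ input_size ∨ hi = 1000) →
    pvAns input_size (pvLoopB input_size lo hi) := by
  intro lo hi
  induction h : (hi - lo).toNat using Nat.strong_induction_on generalizing lo hi with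
  | _ n ih =>
    intro hloe hhie h4 hlohi hhi hmin hcov
    rw [pvLoopB]
    by_cases hlt : lo < hi
    · rw [if_pos hlt]
      set m0 := PySem.Int.floordiv (lo + hi) 2 with hm0
      set mid := m0 - PySem.Int.mod m0 2 with hmid
      have hb := PySem.Int.floordiv_two_mid_bounds (lo := lo) (hi := hi) (by omega)
      have hmn := PySem.Int.mod_nonneg m0 (b := 2) (by omega)
      have hml := PySem.Int.mod_lt m0 (b := 2) (by omega)
      have hm0hi : m0 < hi := by
        rw [hm0]; exact (PySem.Int.floordiv_lt_iff_lt_mul (by omega)).mpr (by omega)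
      have hmeven : mid % 2 = 0 := by
        have := PySem.Int.floordiv_mul_add_mod m0 2
        omega
      have hmidlo : lo ≤ mid := by omega
      have hmidhi : mid ≤ hi - 2 := by omega
      by_cases hc : mid * mid ≥ input_size
      · rw [if_pos hc]
        exact ih (mid - lo).toNat (by omega) lo mid rfl hloe hmeven h4 hmidlo (by omega)
          hmin (Or.inl hc)
      · rw [if_neg hc]
        refine ih (hi - (mid + 2)).toNat (by omega) (mid + 2) hi rfl (by omega) hhie
          (by omega) (by omega) hhi ?_ hcov
        intro v hv4 hvlt hve
        rcases lt_or_ge v lo with h' | h'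
        · exact hmin v hv4 h' hve
        · have hvmid : v ≤ mid := by omega
          push Not at hc
          nlinarith
    · rw [if_neg hlt]
      have heq : lo = hi := by omega
      subst heq
      exact ⟨h4, hhi, hloe, by tauto, hmin⟩

-- ===== VERDICT (by name: the statement is the Claim_ definition above) =====
theorem decide_virtual_image_size_spec : Claim_equal_decide_virtual_image_size := by
  intro input_size _
  unfold Spec_decide_virtual_image_size decide_virtual_image_size decide_virtual_image_size_alt
  have hA := pvLoopA_spec input_size 2 (by omega) (by omega) (by omega)
    (by intro v h4 hle he; omega)
  have hB := pvLoopB_spec input_size 4 1000 (by omega) (by omega) (by omega) (by omega)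
    (by omega) (by intro v h4 hlt he; omega) (Or.inr rfl)
  have heq := pvAns_unique hA.1 hB
  exact Prod.ext heq (by rw [hA.2, heq])
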